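-- pv_equiv track=rewrite | github.com/zaialii/META-HACKER-CUP-2025 | problem2/problem2.py | shortest_ladder
-- ===== SOURCE A (Python) =====
-- def check_height(L, vals):
--     n = len(vals)
--     if n == 0:
--         return True
--
--     got_low = (vals[0] <= L)
--     for i in range(n - 1):
--         if abs(vals[i+1] - vals[i]) > L:
--             if not got_low:
--                 return False
--             got_low = (vals[i+1] <= L)
--         else:
--             if vals[i+1] <= L:
--                 got_low = True
--     return got_low
--
-- def shortest_ladder(arr):
--     if not arr:
--         return 0
--     hi = max(max(arr), max(abs(arr[i+1]-arr[i]) for i in range(len(arr)-1)) if len(arr)>1 else 0)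
--     lo = 0
--
--     while lo < hi:
--         mid = (lo + hi)//2
--         if check_height(mid, arr):
--             hi = mid
--         else:
--             lo = mid + 1
--     return lo
-- ===== SOURCE B (Python) =====
-- def check_height(L, vals):
--     n = len(vals)
--     if n == 0:
--         return True
--
--     got_low = (vals[0] <= L)
--     for i in range(n - 1):
--         if abs(vals[i+1] - vals[i]) > L:
--             if not got_low:
--                 return False
--             got_low = (vals[i+1] <= L)
--         else:
--             if vals[i+1] <= L:
--                 got_low = True
--     return got_low
--
-- def shortest_ladder(arr):
--     # Candidate enumeration instead of binary search: the minimal feasible height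
--     # is always 0, an array value, or an adjacent absolute difference.
--     if not arr:
--         return 0
--     cands = {0}
--     cands.update(v for v in arr if v >= 0)
--     cands.update(abs(b - a) for a, b in zip(arr, arr[1:]))
--     return min(c for c in cands if check_height(c, arr))
-- ===== Notes on version B (the rewrite author's own statement) =====
-- stated objective: alternative
-- what changed: Replaces the binary search over the value range by direct enumeration: the minimal feasible height is always 0, an array element, or an adjacent absolute difference, so B takes the minimum feasible member of that candidate set.
import Mathlib
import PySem

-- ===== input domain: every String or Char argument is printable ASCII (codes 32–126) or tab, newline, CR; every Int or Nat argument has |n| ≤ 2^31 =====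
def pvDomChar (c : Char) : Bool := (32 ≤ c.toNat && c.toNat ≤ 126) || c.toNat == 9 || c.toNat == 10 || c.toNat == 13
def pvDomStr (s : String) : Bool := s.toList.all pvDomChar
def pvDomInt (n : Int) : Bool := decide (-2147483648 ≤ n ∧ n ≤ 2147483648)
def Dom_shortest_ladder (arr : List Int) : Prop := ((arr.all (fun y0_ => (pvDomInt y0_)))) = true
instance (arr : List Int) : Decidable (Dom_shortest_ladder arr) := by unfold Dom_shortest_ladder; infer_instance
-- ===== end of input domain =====

-- B replaces A's binary search over the value range by taking the minimum feasible
-- member of the candidate set {0} ∪ values ∪ adjacent absolute differences (alternative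
-- decomposition, similar cost on small inputs; not claimed faster).


-- ===== PORT A =====
-- the adjacent absolute differences |arr[i+1]-arr[i]| for i in range(len(arr)-1),
-- in order (shared helper: A's index generator and B's zip produce exactly this list)
def adjDiffs : List Int → List Int
  | [] => []
  | [_] => []
  | a :: b :: r => |b - a| :: adjDiffs (b :: r)

-- the for-loop body of check_height, carrying got_low; returning false models the
-- early 'return False'
def checkLoop (L : Int) (got : Bool) (prev : Int) : List Int → Bool
  | [] => got
  | v :: rest =>
      if |v - prev| > L then
        if !got then false
        else checkLoop L (decide (v ≤ L)) v rest
      else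
        if v ≤ L then checkLoop L true v rest
        else checkLoop L got v rest

def check_height (L : Int) (vals : List Int) : Bool :=
  match vals with
  | [] => true
  | v0 :: rest => checkLoop L (decide (v0 ≤ L)) v0 rest

-- the 'while lo < hi' binary-search loop of A
def bsearchLoop (arr : List Int) (lo hi : Int) : Int :=
  if h : lo < hi then
    let mid := PySem.Int.floordiv (lo + hi) 2
    if check_height mid arr then bsearchLoop arr lo mid
    else bsearchLoop arr (mid + 1) hi
  else lo
termination_by (hi - lo).toNat
decreasing_by
  · have h1 : lo ≤ PySem.Int.floordiv (lo + hi) 2 :=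
      (PySem.Int.le_floordiv_iff_mul_le (by norm_num)).2 (by omega)
    have h2 : PySem.Int.floordiv (lo + hi) 2 < hi :=
      (PySem.Int.floordiv_lt_iff_lt_mul (by norm_num)).2 (by omega)
    omega
  · have h1 : lo ≤ PySem.Int.floordiv (lo + hi) 2 :=
      (PySem.Int.le_floordiv_iff_mul_le (by norm_num)).2 (by omega)
    have h2 : PySem.Int.floordiv (lo + hi) 2 < hi :=
      (PySem.Int.floordiv_lt_iff_lt_mul (by norm_num)).2 (by omega)
    omega

def shortest_ladder (arr : List Int) : Int :=
  if arr = [] then 0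
  else
    let maxA := (PySem.List.max? arr (fun x => x)).getD 0
    let maxD := if 1 < arr.length then (PySem.List.max? (adjDiffs arr) (fun x => x)).getD 0 else 0
    bsearchLoop arr 0 (max maxA maxD)

-- ===== PORT B =====
def shortest_ladder_alt (arr : List Int) : Int :=
  if arr = [] then 0
  else
    let cands : PySem.Set Int :=
      PySem.Set.update (PySem.Set.update (PySem.Set.ofList [0])
        (arr.filter (fun v => 0 ≤ v))) (adjDiffs arr)
    (PySem.List.min? (cands.filter (fun c => check_height c arr)) (fun x => x)).getD 0

-- ===== PRECONDITION & SPEC =====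
def Spec_shortest_ladder (arr : List Int) (out : Int) : Prop := out = shortest_ladder_alt arr
instance (arr : List Int) (out : Int) : Decidable (Spec_shortest_ladder arr out) := by unfold Spec_shortest_ladder; infer_instance

-- ===== CLAIM (what is proved, stated in full; the proofs are below) =====
def Claim_equal_shortest_ladder : Prop := ∀ (arr : List Int), Dom_shortest_ladder arr → Spec_shortest_ladder arr (shortest_ladder arr)

-- ===== LEMMAS AND PROOFS =====
-- monotonicity of the feasibility loop in L (and in got_low)
theorem checkLoop_mono (rest : List Int) : ∀ (L L' prev : Int) (g g' : Bool),
    L ≤ L' → (g = true → g' = true) →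
    checkLoop L g prev rest = true → checkLoop L' g' prev rest = true := by
  induction rest with
  | nil => intro L L' prev g g' hL hg h; exact hg h
  | cons v rest ih =>
    intro L L' prev g g' hL hg h
    simp only [checkLoop] at h ⊢
    by_cases h1 : |v - prev| > L
    · have h1' : |v - prev| > L' ∨ ¬(|v - prev| > L') := em _
      simp only [h1, if_pos] at h
      cases g with
      | false => simp at h
      | true =>
        have hg' : g' = true := hg rfl
        subst hg'
        simp only [Bool.not_true, if_neg] at h
        have hgg : decide (v ≤ L) = true → decide (v ≤ L') = true := by
          simp only [decide_eq_true_eq]; intro; omega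
        rcases h1' with h1' | h1'
        · simp only [if_pos h1']
          simp only [Bool.not_true]
          exact ih L L' v _ _ hL hgg (by simpa using h)
        · simp only [if_neg h1']
          by_cases h2 : v ≤ L'
          · simp only [if_pos h2]
            exact ih L L' v _ _ hL (by intro; rfl) (by simpa using h)
          · simp only [if_neg h2]
            have hgg2 : decide (v ≤ L) = true → False := by
              simp only [decide_eq_true_eq]; intro; omega
            exact ih L L' v _ _ hL (fun x => absurd x (fun y => hgg2 y)) (by simpa using h)
    · have h1' : ¬(|v - prev| > L') := by omega
      simp only [if_neg h1, if_neg h1']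
      simp only [if_neg h1] at h
      by_cases h2 : v ≤ L
      · have h2' : v ≤ L' := le_trans h2 hL
        simp only [if_pos h2] at h
        simp only [if_pos h2']
        exact ih L L' v _ _ hL (fun _ => rfl) h
      · simp only [if_neg h2] at h
        by_cases h2' : v ≤ L'
        · simp only [if_pos h2']
          exact ih L L' v _ _ hL (fun _ => rfl) h
        · simp only [if_neg h2']
          exact ih L L' v _ _ hL hg h

theorem adjDiffs_nonneg (l : List Int) : ∀ d ∈ adjDiffs l, 0 ≤ d := by
  match l with
  | [] => simp [adjDiffs]
  | [_] => simp [adjDiffs]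
  | a :: b :: r =>
    intro d hd
    simp only [adjDiffs, List.mem_cons] at hd
    rcases hd with h | h
    · subst h; exact abs_nonneg _
    · exact adjDiffs_nonneg (b :: r) d h

-- if L matches no value and no adjacent difference, lowering L by one changes nothing
theorem checkLoop_congr (rest : List Int) : ∀ (L prev : Int) (g : Bool),
    (∀ v ∈ rest, v ≠ L) → (∀ d ∈ adjDiffs (prev :: rest), d ≠ L) →
    checkLoop (L - 1) g prev rest = checkLoop L g prev rest := by
  induction rest with
  | nil => intro L prev g _ _; rfl
  | cons v rest ih =>
    intro L prev g hv hd
    have hdv : |v - prev| ≠ L := hd _ (by simp [adjDiffs])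
    have hvv : v ≠ L := hv _ (by simp)
    have e1 : (|v - prev| > L - 1) = (|v - prev| > L) := by
      simp only [gt_iff_lt, eq_iff_iff]; omega
    have e2 : (v ≤ L - 1) = (v ≤ L) := by
      simp only [eq_iff_iff]; omega
    have ih' := fun g => ih L v g (fun x hx => hv x (by simp [hx])) (fun d hdm => hd d (by simp [adjDiffs, hdm]))
    simp only [checkLoop, e1, e2]
    by_cases h1 : |v - prev| > L
    · simp only [if_pos h1]
      cases g
      · rfl
      · simp only [Bool.not_true]; exact ih' _
    · simp only [if_neg h1]
      by_cases h2 : v ≤ L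
      · simp only [if_pos h2]; exact ih' _
      · simp only [if_neg h2]; exact ih' _

-- with got_low already true and every adjacent difference within L, the loop stays true
theorem checkLoop_all_small (rest : List Int) : ∀ (L prev : Int),
    (∀ d ∈ adjDiffs (prev :: rest), d ≤ L) → checkLoop L true prev rest = true := by
  induction rest with
  | nil => intro _ _ _; rfl
  | cons v rest ih =>
    intro L prev hd
    have h1 : ¬(|v - prev| > L) := by
      have := hd (|v - prev|) (by simp [adjDiffs]); omega
    simp only [checkLoop, if_neg h1]
    have := ih L v (fun d hdm => hd d (by simp [adjDiffs, hdm]))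
    by_cases h2 : v ≤ L
    · simp only [if_pos h2]; exact this
    · simp only [if_neg h2]; exact this

theorem check_height_mono (L L' : Int) (vals : List Int) (h : L ≤ L')
    (hc : check_height L vals = true) : check_height L' vals = true := by
  match vals with
  | [] => rfl
  | v0 :: rest =>
    simp only [check_height] at hc ⊢
    exact checkLoop_mono rest L L' v0 _ _ h
      (by simp only [decide_eq_true_eq]; intro; omega) hc

theorem check_height_pred (L : Int) (vals : List Int)
    (hv : ∀ v ∈ vals, v ≠ L) (hd : ∀ d ∈ adjDiffs vals, d ≠ L) :
    check_height (L - 1) vals = check_height L vals := by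
  match vals with
  | [] => rfl
  | v0 :: rest =>
    have h0 : v0 ≠ L := hv _ (by simp)
    have e0 : (decide (v0 ≤ L - 1)) = (decide (v0 ≤ L)) := by
      simp only [decide_eq_decide]; omega
    simp only [check_height, e0]
    exact checkLoop_congr rest L v0 _ (fun x hx => hv x (by simp [hx])) hd

-- the binary-search loop returns the least feasible height in [lo, hi]
theorem bsearchLoop_spec (arr : List Int) : ∀ (n : Nat) (lo hi : Int), (hi - lo).toNat ≤ n →
    lo ≤ hi → check_height hi arr = true →
    check_height (bsearchLoop arr lo hi) arr = true ∧
    lo ≤ bsearchLoop arr lo hi ∧ bsearchLoop arr lo hi ≤ hi ∧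
    ∀ k, lo ≤ k → k < bsearchLoop arr lo hi → check_height k arr = false := by
  intro n
  induction n with
  | zero =>
    intro lo hi hn hlohi hc
    have : lo = hi := by omega
    subst this
    rw [bsearchLoop]
    simp only [lt_irrefl, dite_false]
    exact ⟨hc, le_refl _, le_refl _, fun k hk1 hk2 => absurd hk1 (by omega)⟩
  | succ n ih =>
    intro lo hi hn hlohi hc
    rw [bsearchLoop]
    by_cases h : lo < hi
    · simp only [dif_pos h]
      have h1 : lo ≤ PySem.Int.floordiv (lo + hi) 2 :=
        (PySem.Int.le_floordiv_iff_mul_le (by norm_num)).2 (by omega)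
      have h2 : PySem.Int.floordiv (lo + hi) 2 < hi :=
        (PySem.Int.floordiv_lt_iff_lt_mul (by norm_num)).2 (by omega)
      set mid := PySem.Int.floordiv (lo + hi) 2 with hmid
      by_cases hcm : check_height mid arr = true
      · simp only [hcm, if_true]
        obtain ⟨a, b, c, d⟩ := ih lo mid (by omega) h1 hcm
        exact ⟨a, b, by omega, d⟩
      · have hcm' : check_height mid arr = false := by simpa using hcm
        simp only [hcm', Bool.false_eq_true, if_false]
        obtain ⟨a, b, c, d⟩ := ih (mid + 1) hi (by omega) (by omega) hc
        refine ⟨a, by omega, c, ?_⟩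
        intro k hk1 hk2
        by_cases hk3 : k ≤ mid
        · cases hck : check_height k arr with
          | false => rfl
          | true => exact absurd (check_height_mono k mid arr hk3 hck) (by simpa using hcm)
        · exact d k (by omega) hk2
    · simp only [dif_neg h]
      have : lo = hi := by omega
      subst this
      exact ⟨hc, le_refl _, le_refl _, fun k hk1 hk2 => absurd hk1 (by omega)⟩

-- both programs compute the least feasible height ≥ 0, hence agree
theorem main_eq (arr : List Int) : shortest_ladder arr = shortest_ladder_alt arr := by
  by_cases harr : arr = []
  · subst harr; rfl
  obtain ⟨v0, t, rfl⟩ := List.exists_cons_of_ne_nil harr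
  simp only [shortest_ladder, shortest_ladder_alt, if_neg harr]
  set maxA := (PySem.List.max? (v0 :: t) (fun x => x)).getD 0 with hmaxA
  set maxD := (if 1 < (v0 :: t).length then (PySem.List.max? (adjDiffs (v0 :: t)) (fun x => x)).getD 0 else 0) with hmaxD
  set hi := max maxA maxD with hhi
  -- F1: every value ≤ maxA
  have hsomeA : PySem.List.max? (v0 :: t) (fun x => x) = some maxA := by
    cases hA : PySem.List.max? (v0 :: t) (fun x => x) with
    | none => exact absurd (Iff.mp (PySem.List.max?_eq_none_iff _ _) hA) (by simp)
    | some m => simp [hmaxA, hA]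
  have F1 : ∀ v ∈ (v0 :: t), v ≤ maxA := by
    intro v hv
    exact PySem.List.max?_isMax hsomeA v hv
  -- F2: every adjacent difference ≤ maxD, and 0 ≤ maxD
  have F2 : ∀ d ∈ adjDiffs (v0 :: t), d ≤ maxD := by
    intro d hd
    match t with
    | [] => simp [adjDiffs] at hd
    | b :: r =>
      have hlen : 1 < (v0 :: b :: r).length := by simp
      have hne2 : adjDiffs (v0 :: b :: r) ≠ [] := by simp [adjDiffs]
      cases hD : PySem.List.max? (adjDiffs (v0 :: b :: r)) (fun x => x) with
      | none => exact absurd (Iff.mp (PySem.List.max?_eq_none_iff _ _) hD) hne2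
      | some m =>
        have : maxD = m := by simp [hmaxD, hD]
        rw [this]
        exact PySem.List.max?_isMax hD d hd
  have F3 : 0 ≤ maxD := by
    match t with
    | [] => simp [hmaxD]
    | b :: r =>
      have hlen : 1 < (v0 :: b :: r).length := by simp
      cases hD : PySem.List.max? (adjDiffs (v0 :: b :: r)) (fun x => x) with
      | none => exact absurd (Iff.mp (PySem.List.max?_eq_none_iff _ _) hD) (by simp [adjDiffs])
      | some m =>
        have hmem : m ∈ adjDiffs (v0 :: b :: r) := PySem.List.max?_mem hD
        have := adjDiffs_nonneg _ m hmem
        simp [hmaxD, hD]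
        omega
  -- hi is feasible
  have hhi0 : 0 ≤ hi := le_trans F3 (le_max_right _ _)
  have Phi : check_height hi (v0 :: t) = true := by
    simp only [check_height]
    have h0 : decide (v0 ≤ hi) = true := by
      simp only [decide_eq_true_eq]
      exact le_trans (F1 v0 (by simp)) (le_max_left _ _)
    rw [h0]
    exact checkLoop_all_small t hi v0 (fun d hd => le_trans (F2 d hd) (le_max_right _ _))
  -- A's binary search result and its characterisation
  obtain ⟨Pr, hr0, hrhi, hmin⟩ :=
    bsearchLoop_spec (v0 :: t) (hi - 0).toNat 0 hi (le_refl _) hhi0 Phi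
  set r := bsearchLoop (v0 :: t) 0 hi with hr
  -- candidate set membership
  set cands : PySem.Set Int :=
    PySem.Set.update (PySem.Set.update (PySem.Set.ofList [0])
      ((v0 :: t).filter (fun v => 0 ≤ v))) (adjDiffs (v0 :: t)) with hcands
  have mem_cands : ∀ x, x ∈ cands ↔ (x = 0 ∨ (x ∈ (v0 :: t) ∧ 0 ≤ x) ∨ x ∈ adjDiffs (v0 :: t)) := by
    intro x
    rw [hcands, PySem.Set.mem_update, PySem.Set.mem_update, PySem.Set.mem_ofList]
    simp only [List.mem_singleton, List.mem_filter, decide_eq_true_eq]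
    tauto
  -- r is a feasible candidate
  have hrc : r ∈ cands := by
    rw [mem_cands]
    by_cases hr0' : r = 0
    · exact Or.inl hr0'
    · have hrpos : 0 < r := by omega
      have hnot : ¬((∀ v ∈ (v0 :: t), v ≠ r) ∧ (∀ d ∈ adjDiffs (v0 :: t), d ≠ r)) := by
        rintro ⟨hv, hd⟩
        have := check_height_pred r (v0 :: t) hv hd
        rw [Pr] at this
        have hfalse := hmin (r - 1) (by omega) (by omega)
        rw [hfalse] at this
        exact Bool.false_ne_true this
      by_cases hvall : ∀ v ∈ (v0 :: t), v ≠ r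
      · by_cases hdall : ∀ d ∈ adjDiffs (v0 :: t), d ≠ r
        · exact absurd ⟨hvall, hdall⟩ hnot
        · push_neg at hdall
          obtain ⟨d, hd, hdr⟩ := hdall
          exact Or.inr (Or.inr (hdr ▸ hd))
      · push_neg at hvall
        obtain ⟨v, hv, hvr⟩ := hvall
        exact Or.inr (Or.inl ⟨hvr ▸ hv, by omega⟩)
  set feas := cands.filter (fun c => check_height c (v0 :: t)) with hfeas
  have hrf : r ∈ feas := by
    rw [hfeas, List.mem_filter]
    exact ⟨hrc, by simpa using Pr⟩
  have hrmin : ∀ c ∈ feas, r ≤ c := by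
    intro c hc
    rw [hfeas, List.mem_filter] at hc
    obtain ⟨hcc, hcp⟩ := hc
    have hc0 : 0 ≤ c := by
      rcases (mem_cands c).mp hcc with h | h | h
      · omega
      · exact h.2
      · exact adjDiffs_nonneg _ c h
    by_contra hlt
    push_neg at hlt
    have hfk := hmin c hc0 hlt
    rw [hfk] at hcp
    exact Bool.false_ne_true (by simpa using hcp)
  cases hm : PySem.List.min? feas (fun x => x) with
  | none =>
    have hfe : feas = [] := Iff.mp (PySem.List.min?_eq_none_iff _ _) hm
    rw [hfe] at hrf
    simp at hrf
  | some m =>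
    have hm1 : m ∈ feas := PySem.List.min?_mem hm
    have hm2 : m ≤ r := PySem.List.min?_isMin hm r hrf
    have hm3 : r ≤ m := hrmin m hm1
    simp only [Option.getD_some]
    omega

-- ===== VERDICT (by name: the statement is the Claim_ definition above) =====
theorem shortest_ladder_spec : Claim_equal_shortest_ladder := by
  unfold Claim_equal_shortest_ladder Spec_shortest_ladder
  exact fun arr _ => main_eq arr
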